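-- pv_equiv track=rewrite | github.com/theoddden/terradev-mcp | terradev_mcp_cuco_tools.py | _assess_implementation_complexity
-- ===== SOURCE A (Python) =====
-- from typing import Dict, List, Optional, Any, Tuple
--
-- def _assess_implementation_complexity(recommendations: List[Dict[str, Any]]) -> str:
--     """Assess implementation complexity"""
--     complexities = [rec.get("complexity", "medium") for rec in recommendations]
--
--     if "high" in complexities:
--         return "high"
--     elif "medium" in complexities:
--         return "medium"
--     else:
--         return "low"
-- ===== SOURCE B (Python) =====
-- from typing import Dict, List, Optional, Any
--
-- def _assess_implementation_complexity(recommendations: List[Dict[str, Any]]) -> str: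
--     """Assess implementation complexity (single-pass max-rank reduction)"""
--     rank = {"high": 2, "medium": 1}
--     best = 0
--     for rec in recommendations:
--         best = max(best, rank.get(rec.get("complexity", "medium"), 0))
--     return {2: "high", 1: "medium"}.get(best, "low")
-- ===== Notes on version B (the rewrite author's own statement) =====
-- stated objective: simpler
-- what changed: Replaced the materialized complexities list with two ordered membership scans by a single-pass reduction keeping the maximum numeric rank (high=2, medium=1, other=0) and mapping it back to a string.
import Mathlib
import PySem

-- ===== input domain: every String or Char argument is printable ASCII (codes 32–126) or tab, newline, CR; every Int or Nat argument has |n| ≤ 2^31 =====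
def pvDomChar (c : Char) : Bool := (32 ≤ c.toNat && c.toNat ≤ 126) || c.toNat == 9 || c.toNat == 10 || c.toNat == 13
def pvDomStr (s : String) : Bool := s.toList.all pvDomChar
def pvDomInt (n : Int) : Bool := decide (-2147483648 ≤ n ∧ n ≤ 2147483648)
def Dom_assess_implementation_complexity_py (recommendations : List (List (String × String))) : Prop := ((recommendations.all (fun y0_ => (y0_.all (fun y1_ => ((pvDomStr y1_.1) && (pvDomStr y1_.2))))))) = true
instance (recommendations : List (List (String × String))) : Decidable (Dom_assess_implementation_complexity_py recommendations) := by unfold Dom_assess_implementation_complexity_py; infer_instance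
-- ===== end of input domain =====

-- B replaces A's materialized list and ordered membership scans by a single-pass
-- maximum-rank reduction (simpler: one loop, one integer of state).


-- ===== PORT A =====
-- rec.get("complexity", "medium"): first-match lookup on the association list (exact for a Python dict, whose keys are unique)
def assess_implementation_complexity_py (recommendations : List (List (String × String))) : String :=
  let complexities := recommendations.map (fun rec => (PySem.Dict.mk rec).getD "complexity" "medium")
  if complexities.contains "high" then "high"
  else if complexities.contains "medium" then "medium"
  else "low"

-- ===== PORT B =====
-- rank.get(c, 0) for rank = {"high": 2, "medium": 1}
def pvRankGet (c : String) : Int :=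
  (PySem.Dict.mk [("high", (2 : Int)), ("medium", 1)]).getD c 0

def assess_implementation_complexity_py_alt (recommendations : List (List (String × String))) : String :=
  let best := recommendations.foldl
    (fun best rec => max best (pvRankGet ((PySem.Dict.mk rec).getD "complexity" "medium"))) 0
  (PySem.Dict.mk [((2 : Int), "high"), (1, "medium")]).getD best "low"

-- ===== PRECONDITION & SPEC =====
def Spec_assess_implementation_complexity_py (recommendations : List (List (String × String))) (out : String) : Prop := out = assess_implementation_complexity_py_alt recommendations
instance (recommendations : List (List (String × String))) (out : String) : Decidable (Spec_assess_implementation_complexity_py recommendations out) := by unfold Spec_assess_implementation_complexity_py; infer_instance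

-- ===== CLAIM (what is proved, stated in full; the proofs are below) =====
def Claim_equal_assess_implementation_complexity_py : Prop := ∀ (recommendations : List (List (String × String))), Dom_assess_implementation_complexity_py recommendations → Spec_assess_implementation_complexity_py recommendations (assess_implementation_complexity_py recommendations)

-- ===== LEMMAS AND PROOFS =====

-- the maximum rank of a list of complexity strings (0 when empty)
def pvMaxRank (cs : List String) : Int := cs.foldr (fun c m => max (pvRankGet c) m) 0

lemma pvRankGet_cases (c : String) :
    (c = "high" ∧ pvRankGet c = 2) ∨ (c = "medium" ∧ pvRankGet c = 1) ∨
    (c ≠ "high" ∧ c ≠ "medium" ∧ pvRankGet c = 0) := by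
  by_cases h1 : c = "high"
  · exact Or.inl ⟨h1, by subst h1; decide⟩
  · by_cases h2 : c = "medium"
    · exact Or.inr (Or.inl ⟨h2, by subst h2; decide⟩)
    · refine Or.inr (Or.inr ⟨h1, h2, ?_⟩)
      simp [pvRankGet, PySem.Dict.getD, PySem.Dict.get?,
            show ("high" : String) ≠ c from fun h => h1 h.symm,
            show ("medium" : String) ≠ c from fun h => h2 h.symm]

lemma pvRankGet_nonneg (c : String) : 0 ≤ pvRankGet c := by
  rcases pvRankGet_cases c with ⟨_, e⟩ | ⟨_, e⟩ | ⟨_, _, e⟩ <;> rw [e] <;> omega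

lemma pvFoldl_max_rank {α : Type} (f : α → String) (l : List α) (b : Int) (hb : 0 ≤ b) :
    l.foldl (fun best x => max best (pvRankGet (f x))) b = max b (pvMaxRank (l.map f)) := by
  induction l generalizing b with
  | nil => simp [pvMaxRank]; omega
  | cons h t ih =>
    have hr := pvRankGet_nonneg (f h)
    simp only [List.foldl_cons, ih (max b (pvRankGet (f h))) (by omega),
      pvMaxRank, List.map_cons, List.foldr_cons]
    omega

lemma pvMaxRank_nonneg (cs : List String) : 0 ≤ pvMaxRank cs := by
  induction cs with
  | nil => simp [pvMaxRank]
  | cons h t ih => simp only [pvMaxRank, List.foldr_cons] at *; omega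

lemma pvMaxRank_le_two (cs : List String) : pvMaxRank cs ≤ 2 := by
  induction cs with
  | nil => simp [pvMaxRank]
  | cons h t ih =>
    simp only [pvMaxRank, List.foldr_cons] at *
    rcases pvRankGet_cases h with ⟨_, e⟩ | ⟨_, e⟩ | ⟨_, _, e⟩ <;> rw [e] <;> omega

lemma pvHigh_mem_iff (cs : List String) : "high" ∈ cs ↔ pvMaxRank cs = 2 := by
  induction cs with
  | nil => simp [pvMaxRank]
  | cons h t ih =>
    have hnn := pvMaxRank_nonneg t
    have hle := pvMaxRank_le_two t
    simp only [pvMaxRank, List.foldr_cons, List.mem_cons] at *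
    rcases pvRankGet_cases h with ⟨hc, e⟩ | ⟨hc, e⟩ | ⟨hc1, _, e⟩ <;> rw [e] <;>
      constructor <;> intro hx
    · omega
    · exact Or.inl hc.symm
    · rcases hx with hx | hx
      · exact absurd (hx.trans hc) (by decide)
      · have := ih.mp hx; omega
    · exact Or.inr (ih.mpr (by omega))
    · rcases hx with hx | hx
      · exact absurd hx.symm hc1
      · have := ih.mp hx; omega
    · exact Or.inr (ih.mpr (by omega))

lemma pvMed_mem_le (cs : List String) (h : "medium" ∈ cs) : 1 ≤ pvMaxRank cs := by
  induction cs with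
  | nil => simp at h
  | cons x t ih =>
    have hnn := pvMaxRank_nonneg t
    simp only [pvMaxRank, List.foldr_cons] at *
    rcases List.mem_cons.mp h with hx | hx
    · rcases pvRankGet_cases x with ⟨_, e⟩ | ⟨_, e⟩ | ⟨_, hc2, e⟩
      · rw [e]; omega
      · rw [e]; omega
      · exact absurd hx.symm hc2
    · have := ih hx; omega

lemma pvNone_mem_zero (cs : List String) (h1 : "high" ∉ cs) (h2 : "medium" ∉ cs) :
    pvMaxRank cs = 0 := by
  induction cs with
  | nil => simp [pvMaxRank]
  | cons x t ih =>
    simp only [List.mem_cons, not_or] at h1 h2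
    have := ih h1.2 h2.2
    simp only [pvMaxRank, List.foldr_cons] at *
    rcases pvRankGet_cases x with ⟨hc, _⟩ | ⟨hc, _⟩ | ⟨_, _, e⟩
    · exact absurd hc.symm h1.1
    · exact absurd hc.symm h2.1
    · rw [e]; omega

lemma pvBack_eq (m : Int) (h0 : 0 ≤ m) (h2 : m ≤ 2) :
    (PySem.Dict.mk [((2 : Int), "high"), (1, "medium")]).getD m "low" =
    (if m = 2 then "high" else if m = 1 then "medium" else "low") := by
  interval_cases m <;> decide

-- ===== VERDICT (by name: the statement is the Claim_ definition above) =====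
theorem assess_implementation_complexity_py_spec : Claim_equal_assess_implementation_complexity_py := by
  intro recs _
  unfold Spec_assess_implementation_complexity_py assess_implementation_complexity_py
      assess_implementation_complexity_py_alt
  rw [pvFoldl_max_rank (fun rec => (PySem.Dict.mk rec).getD "complexity" "medium") recs 0 le_rfl]
  set cs := recs.map (fun rec => (PySem.Dict.mk rec).getD "complexity" "medium") with hcs
  have hnn := pvMaxRank_nonneg cs
  have hle := pvMaxRank_le_two cs
  rw [show max (0 : Int) (pvMaxRank cs) = pvMaxRank cs by omega, pvBack_eq _ hnn hle]
  by_cases hh : "high" ∈ cs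
  · have h2 := (pvHigh_mem_iff cs).mp hh
    simp [hh, h2]
  · have hne2 : pvMaxRank cs ≠ 2 := fun h => hh ((pvHigh_mem_iff cs).mpr h)
    by_cases hm : "medium" ∈ cs
    · have h1 : pvMaxRank cs = 1 := by have := pvMed_mem_le cs hm; omega
      simp [hh, hm, h1]
    · have h0 : pvMaxRank cs = 0 := pvNone_mem_zero cs hh hm
      simp [hh, hm, h0]
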